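/- GENERATED by mk_final_copies.py from the proof of the farm's unit `start_decoder.C6d` (farm:start_decoder.C6d.1: Proof.lean) as the
   re-elaboration sweep compiled it — do not edit. -/
import Asan.CheckWalk
import Vorbis.Spec.Units.start_decoder_C6d
import Vorbis.Spec.Worked.start_decoder_C6d_Lemmas
import Vorbis.Spec.StartDecoderCarry
import Vorbis.Spec.StartDecoderC7

open X86 X86.User Asan Vorbis Vorbis.Spec Vorbis.Spec.StartDecoder

set_option maxRecDepth 100000
set_option maxHeartbeats 4000000

namespace Vorbis.Spec.start_decoder_C6d

/-- Segment C6d: from the return of the first `setup_temp_malloc(f, 4·sorted_entries)` (0x114930, `AtC6d`): the checked store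
`c->codewords = rax` (`C7.cb_site`; the invariant side is `c6d_carry` + `c6d_fields`), then NULL → the outofmem stub (`error`,
`AtERR` by `Cur.failed` on the carried CUR(i)), else the checked load of `sorted_entries`, `setup_temp_malloc(f, 4·SE)` and `AtC6e`
(`c6d_temp_call` / `c6d_temp_fail` + `c6d_build`). -/
theorem c6d_walk : Vorbis.Spec.start_decoder_C6d.Statement := by
  intro Lay hLay μ hμ u₀ hcode hld4 h_error hst8 h_tmalloc
  intro g i v hat
  obtain ⟨A, lengths, A2, A3, Ai, Aw, h⟩ := hat
  have hfr := h.mid.frame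
  have hhand := h.mid.cur.hand
  have he := hfr.entry
  v_entry he
  simp only [depth] at he_room he_stack
  have w_rip := hfr.rip
  have w_rsp := hfr.rsp
  have w_eq : Mem.EqOn Vorbis.L.textLo Vorbis.L.textHi u₀.mem v.mem := hfr.code
  have hdf : v.flags .df = false := (show abiInv _ from hfr.inv).1
  have hmx : v.mxcsr &&& 0x1F80 = 0x1F80 := (show abiInv _ from hfr.inv).2
  have hsse := Vorbis.sseOK_of_abiInv hfr.inv
  obtain ⟨hR1, hR2⟩ := hfr.r_eq
  have eR : g.R = (g.e.reg .rsp).toNat - 1480 := rfl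
  have eRA : g.RA = (g.e.reg .rsp).toNat := rfl
  have c_rsp : v.reg .rsp = g.e.reg .rsp - 1480 := by
    rw [w_rsp, eR, ← Vorbis.addr_sub_lit _ 1480 (by show (1480 : Nat) ≤ _; omega), Vorbis.addr_toNat]
  clear w_rsp
  have k_rsp := c_rsp
  have r_f : v.mem.readLE (g.e.reg .rsp - 1456) 8 = g.f := by
    have e : g.e.reg .rsp - 1456 = addr (g.R + 0x18) := by
      have e1 : g.R + 0x18 = (g.e.reg .rsp).toNat - 1456 := by
        show (g.e.reg .rsp).toNat - 1480 + 0x18 = _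
        omega
      rw [e1, ← Vorbis.addr_sub_lit _ 1456 (by show (1456 : Nat) ≤ _; omega), Vorbis.addr_toNat]
    rw [e]
    exact h.mid.cur.slot_f
  have hpos : Pos g A := Pos.of hfr h.mid.cur
  have hm0 : MInv g i A2 A3 Ai A v.mem := MInv.of hfr h.mid.cur
  have hcw := hm0.c_where
  obtain ⟨c, hc⟩ : ∃ c, g.cb v.mem i = c := ⟨_, rfl⟩
  have c_r14 := h.mid.cur.r14
  rw [hc] at c_r14 hcw
  have hcT : (addr c).toNat = c := Vorbis.toNat_addr _ (by omega)
  have hfT : (addr g.f).toNat = g.f := Vorbis.toNat_addr _ (by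
    have := hpos.f_hi
    omega)
  have hsub : ∀ o, o ∈ stackObjs g.frames ++ A.2 → o ∈ stackObjs g.frames' ++ A.2 := by
    intro o ho
    unfold Ghost.frames'
    rw [stackObjs_cons]
    rcases List.mem_append.mp ho with hs | ho'
    · exact List.mem_append_left _ (List.mem_append_right _ hs)
    · exact List.mem_append_right _ ho'
  have herr := h_error A.2 g.frames'
  have hText : 1154368 ≤ A.1.B := hhand.arenaText
  have t1 : (g.e.reg .rsp - 1488).toNat = (g.e.reg .rsp).toNat - 1488 := by u_omega
  have hfn : (UInt64.ofNat g.f).toNat = g.f := hfT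
  -- STAGE 1: 0x114930 … the return of the check of `c + 2112` (0x114951), or the outofmem stub to the epilogue
  u_walk hcode [hμ.vendor] until [Vorbis.L.start_decoder.ret186, pc_ERR] span [Vorbis.L.textLo, Vorbis.L.textHi] side (v_side)
  case check_114937 =>
    have hun : ShadowUntouched v.mem s_114937.mem := by v_untouched
    have hsite := C7.cb_site h.mid.cur 40 8 (by omega) (by omega)
    rw [hc] at hsite
    apply Vorbis.Spec.check_site hfr.shadow hun hsite
    u_omega
  case call_inv => v_inv
  case pre_1149b0 =>
    have hun : ShadowUntouched v.mem s_1149b0.mem := by v_untouched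
    have hf' : (s_1149b0.reg .rdi).toNat = g.f := by
      rw [w_rdi]
      exact hfn
    have hrs : (s_1149b0.reg .rsp).toNat + 8 = g.R := by
      rw [w_rsp, t1]
      omega
    refine ⟨⟨?_, hfr.offText⟩, ?_⟩
    · rw [hrs]
      exact hfr.shadow.untouched hun
    · rw [hf']
      exact hhand.obj.mono hsub
  case check_11494c =>
    have hun : ShadowUntouched v.mem s_11494c.mem := by v_untouched
    have hsite := C7.cb_site h.mid.cur 2112 4 (by omega) (by omega)
    rw [hc] at hsite
    apply Vorbis.Spec.check_site hfr.shadow hun hsite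
    u_omega
  case cont =>
    -- 0x1149b5: `error(f, VORBIS_outofmem)` returned (after the store of the NULL): the `jmp` to the epilogue
    have hsA : Mem.SameExcept [⟨g.R - 408, g.R⟩, ⟨c + 40, c + 48⟩] v.mem s_1149b0.mem := by u_same
    have hunA : ShadowUntouched v.mem s_1149b0.mem := by v_untouched
    rw [w_mem_1149b0] at hsA hunA
    v_after_call w_rsp_1149b0 w_mem_1149b0
    have hf : (s_1149b0.reg .rdi).toNat = g.f := by
      rw [w_rdi_1149b0]
      exact hfn
    simp only [hf, t1] at w_same
    have hp : s_1149b0r.reg .rax = 0 ∧ ShadowUntouched s_1149b0.mem s_1149b0r.mem ∧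
        s_1149b0r.mem.readLE (s_1149b0.reg .rdi + 140) 4 = (s_1149b0.reg .rsi).toNat % 2 ^ 32 := w_post
    have w_rax : s_1149b0r.reg .rax = 0 := hp.1
    have hun3 : ShadowUntouched s_1149b0.mem s_1149b0r.mem := hp.2.1
    rw [w_mem_1149b0] at hun3
    have hsB : Mem.SameExcept [⟨g.R - 408, g.R⟩, ⟨c + 40, c + 48⟩, ⟨g.f + 140, g.f + 144⟩] v.mem s_1149b0r.mem := by
      refine (C7.sameExcept_weaken hsA ?_).trans (w_same.mono ?_)
      · intro w hw
        simp only [List.mem_cons, List.mem_nil_iff, or_false] at hw ⊢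
        rcases hw with rfl | rfl
        · exact Or.inl rfl
        · exact Or.inr (Or.inl rfl)
      · intro w hw a h1 h2
        simp only [List.mem_cons, List.mem_nil_iff, or_false] at hw
        rcases hw with rfl | rfl
        · simp only [] at h1 h2
          exact ⟨_, List.mem_cons_self, by simp only []; omega, by simp only []; omega⟩
        · simp only [] at h1 h2
          exact ⟨_, List.mem_cons_of_mem _ (List.mem_cons_of_mem _ List.mem_cons_self), by simp only []; omega,
            by simp only []; omega⟩
    have hunB : ShadowUntouched v.mem s_1149b0r.mem := Mem.EqOn.trans hunA hun3
    have hokB : ∀ w, w ∈ [(⟨g.R - 408, g.R⟩ : Span), ⟨c + 40, c + 48⟩, ⟨g.f + 140, g.f + 144⟩] →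
        C6dWin g (g.cb v.mem i) 40 w := by
      intro w hw
      rw [hc]
      simp only [List.mem_cons, List.mem_nil_iff, or_false] at hw
      unfold C6dWin
      rcases hw with rfl | rfl | rfl <;> simp only [] <;> omega
    u_walk hcode [hμ.vendor] until [Vorbis.L.start_decoder.ret186, pc_ERR] span [Vorbis.L.textLo, Vorbis.L.textHi] side (v_side)
    have hsC : Mem.SameExcept [⟨g.R - 408, g.R⟩, ⟨c + 40, c + 48⟩, ⟨g.f + 140, g.f + 144⟩] v.mem s_1149b5.mem := by
      rw [w_mem]
      exact hsB
    have hunC : ShadowUntouched v.mem s_1149b5.mem := by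
      rw [w_mem]
      exact hunB
    have hinv' : abiInv s_1149b5 := by
      refine Vorbis.abiInv_of ?_ ?_
      · rw [w_flags]
        exact w_df
      · rw [w_mxcsr]
        exact w_mx
    have hrsp' : s_1149b5.reg .rsp = v.reg .rsp := by
      rw [w_rsp, c_rsp]
    obtain ⟨hfr', hcur', _, _, _⟩ := c6d_carry 40 (by omega) hfr h.mid.cur hsC hunC hokB w_rip hrsp' w_eq hinv'
      (w_kept.get .r14 rfl)
    apply ReachVia.done
    refine Or.inr ⟨A, hfr', hhand, Or.inl ⟨?_, hcur'.failed⟩⟩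
    rw [w_rax]
    rfl
  case cont =>
    -- STAGE 2: the state `s` = 0x114951 (the check of `c + 2112` returned): `codewords` = P2 is stored and non-NULL
    have hne : ¬ v.reg .rax = 0 := by
      intro h0
      rw [h0] at hbr_114943
      exact hbr_114943 rfl
    have hT : TempsAre A.1 [((v.reg .rax).toNat, 4 * (Codebook.sorted_entries v.mem c).toNat),
        (lengths, (Codebook.entries v.mem c).toNat)] := by
      rcases h.res with h0 | hT
      · exact absurd h0 hne
      · rw [hc] at hT
        exact hT
    have hTl : A.1.TBlock lengths (Codebook.entries v.mem c).toNat :=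
      hT.tblock (List.mem_cons_of_mem _ List.mem_cons_self)
    have hsA : Mem.SameExcept [⟨g.R - 408, g.R⟩, ⟨c + 40, c + 48⟩] v.mem s_11494cr.mem := by u_same
    have hunA : ShadowUntouched v.mem s_11494cr.mem := by v_untouched
    have hokA : ∀ w, w ∈ [(⟨g.R - 408, g.R⟩ : Span), ⟨c + 40, c + 48⟩] → C6dWin g (g.cb v.mem i) 40 w := by
      intro w hw
      rw [hc]
      simp only [List.mem_cons, List.mem_nil_iff, or_false] at hw
      unfold C6dWin
      rcases hw with rfl | rfl <;> simp only [] <;> omega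
    have hrspS : s_11494cr.reg .rsp = v.reg .rsp := by
      rw [w_rsp, c_rsp]
    have hinvS : abiInv s_11494cr := by v_inv
    obtain ⟨hfrS, hcurS, hcbS, hlo, hhi⟩ := c6d_carry 40 (by omega) hfr h.mid.cur hsA hunA hokA w_rip hrspS w_eq hinvS
      (w_kept.get .r14 rfl)
    have hlenK0 := c6d_tblock_kept0 (by omega) hpos hm0 hsA hokA hTl
    rw [hc] at hcbS hlo hhi
    obtain ⟨e_dim, e_ent, e_cl, e_sp, e_se, hfresh⟩ := c6d_fields hlo hhi
    have e_cw : Codebook.codewords s_11494cr.mem c = (v.reg .rax).toNat := by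
      simp only [vacc, voff]
      unfold Mem.u64
      rw [← Vorbis.addr_add_lit, w_mem]
      u_read
    -- the clauses of `InC6d` at `s`: every one reads other bytes of the struct, or the temp block `lengths`
    have hlenE := hlenK0.same
    have hlenI := hlenK0.inside
    simp only [vblock] at hlenE hlenI
    have hk1 := h.mid.k1
    have hk2 := h.mid.k2
    have hsp1 := h.sparse1
    have hfr5 := h.mid.fresh
    have hlenL := h.mid.lenL
    have hsl := h.sparse_lengths
    have hcnt := h.cnt
    rw [hc] at hk1 hk2 hsp1 hfr5 hlenL hsl hcnt
    have hmidS : InC6Mid u₀ g i A2 A3 Ai Aw A lengths Vorbis.L.start_decoder.ret186 s_11494cr :=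
      { frame := hfrS
        cur := hcurS
        extw := h.mid.extw
        extw' := h.mid.extw'
        k1 := by
          rw [hcbS]
          exact ⟨by rw [e_dim]; exact hk1.dim_pos, by rw [e_dim]; exact hk1.dim_le, by rw [e_ent]; exact hk1.ent_nonneg,
            by rw [e_ent]; exact hk1.ent_lt⟩
        k2 := by
          rw [hcbS]
          exact
            { sparse_01 := by rw [e_sp]; exact hk2.sparse_01
              se_nonneg := by rw [e_se]; exact hk2.se_nonneg
              se_le := by rw [e_se, e_ent]; exact hk2.se_le
              sparse_pos := by rw [e_sp, e_se]; exact hk2.sparse_pos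
              sparse_quarter := by rw [e_sp, e_se, e_ent]; exact hk2.sparse_quarter }
        rbx := (w_kept.get .rbx rfl).trans h.mid.rbx
        lenL := by rw [hcbS, e_ent]; exact hlenL.same hlenE hlenI
        fresh := by rw [hcbS]; exact hfresh hfr5 }
    have eES : (Codebook.entries s_11494cr.mem (g.cb s_11494cr.mem i)).toNat = (Codebook.entries v.mem c).toNat := by
      rw [hcbS, e_ent]
    have eSES : (Codebook.sorted_entries s_11494cr.mem (g.cb s_11494cr.mem i)).toNat =
        (Codebook.sorted_entries v.mem c).toNat := by
      rw [hcbS, e_se]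
    have eCWS : Codebook.codewords s_11494cr.mem (g.cb s_11494cr.mem i) = (v.reg .rax).toNat := by
      rw [hcbS, e_cw]
    have sparse1S : Codebook.sparse s_11494cr.mem (g.cb s_11494cr.mem i) = 1 := by
      rw [hcbS, e_sp]
      exact hsp1
    have slS : Since Aw A.1 ⟨Codebook.codeword_lengths s_11494cr.mem (g.cb s_11494cr.mem i),
        (Codebook.sorted_entries s_11494cr.mem (g.cb s_11494cr.mem i)).toNat⟩ := by
      rw [hcbS, e_cl, e_se]
      exact hsl
    have cntS : CNT s_11494cr.mem lengths (g.cb s_11494cr.mem i) := by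
      unfold CNT at hcnt ⊢
      rw [hcbS, e_ent, e_se, C7.usedCount_same hlenE hlenI]
      exact hcnt
    have tempsS : TempsAre A.1
        [(Codebook.codewords s_11494cr.mem (g.cb s_11494cr.mem i),
            4 * (Codebook.sorted_entries s_11494cr.mem (g.cb s_11494cr.mem i)).toNat),
         (lengths, (Codebook.entries s_11494cr.mem (g.cb s_11494cr.mem i)).toNat)] := by
      rw [eES, eSES, eCWS]
      exact hT
    have hTlS : A.1.TBlock lengths (Codebook.entries s_11494cr.mem (g.cb s_11494cr.mem i)).toNat := by
      rw [eES]
      exact hTl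
    -- the load of `sorted_entries` (0x114951) reads the field of the cut point's memory
    have r_se : v.mem.readLE (addr c + 2112) 4 = (Codebook.sorted_entries v.mem c).toNat := by
      have h0 := hk2.se_nonneg
      simp only [vacc, voff] at h0 ⊢
      rw [Vorbis.addr_add_lit]
      exact v.mem.u32_of_i32_nonneg (c + 2112) h0
    have hSElt : (Codebook.sorted_entries v.mem c).toNat < 2 ^ 24 := by
      have h1 := hk2.se_le
      have h2 := hk1.ent_lt
      have h3 := hk2.se_nonneg
      omega
    have htm := h_tmalloc A.2 g.frames' A.1
    obtain ⟨hf1, hf2, hf3⟩ := c6d_obj_where h.mid.cur hfr.shadow hfr.offText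
    have p6 := hpos.f_stack
    have c_memS := w_mem
    have c_rspS := w_rsp
    have c_keptS := w_kept
    have hRS : (g.e.reg .rsp - 1488).toNat + 8 = g.R := by u_omega
    clear hk1 hk2 hsp1 hfr5 hlenL hsl hcnt hlo hhi hfresh hlenK0 hlenE hlenI hokA
    u_walk hcode [hμ.vendor] until [Vorbis.L.start_decoder.cut132] span [Vorbis.L.textLo, Vorbis.L.textHi] side (v_side)
    case call_inv => v_inv
    case pre_114964 =>
      have hmem1 : s_114964.mem = s_11494cr.mem.writeLE (g.e.reg .rsp - 1488) 8 1132905 := by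
        rw [w_mem, c_memS, Mem.writeLE_writeLE_same _ _ 8 _ _ (by decide)]
      have hun : ShadowUntouched s_11494cr.mem s_114964.mem := by
        rw [hmem1]
        exact Mem.eqOn_writeLE _ _ 8 _ 0xC00000 0x200000 (by omega) (by omega)
      apply c6d_tmalloc_pre hfrS hcurS hun
      · rw [hmem1]
        apply Mem.EqOn.writeLE
        · u_omega
        · u_omega
      · rw [w_rsp]
        u_omega
      · rw [w_rdi]
        exact hfT
    -- 0x114969: setup_temp_malloc(f, 4·SE) returned
    have ersi : (s_114964.reg .rsi).toNat % 2 ^ 32 =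
        4 * (Codebook.sorted_entries s_11494cr.mem (g.cb s_11494cr.mem i)).toNat := by
      have e1 : (BitVec.ofNat 32 (Codebook.sorted_entries v.mem c).toNat).toNat = (Codebook.sorted_entries v.mem c).toNat :=
        toNat_ofNat32 _ (by omega)
      rw [w_rsi_114964, c6d_lea4 _ (by rw [e1]; omega), e1, eSES]
      omega
    have hmemS : s_114964.mem = s_11494cr.mem.writeLE (g.e.reg .rsp - 1488) 8 1132905 := by
      rw [w_mem_114964, c_memS, Mem.writeLE_writeLE_same _ _ 8 _ _ (by decide)]
    simp only [X86.User.Spec.footprint, vspec] at w_same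
    have e_sp' : (s_114964.reg .rsp).toNat + 8 = g.R := by
      rw [w_rsp_114964]
      exact hRS
    have e_rdi : (s_114964.reg .rdi).toNat = g.f := by
      rw [w_rdi_114964]
      exact hfT
    have hrspR : s_114964r.reg .rsp = s_11494cr.reg .rsp := by
      rw [w_rsp, c_rspS]
    have hr14R : s_114964r.reg .r14 = s_11494cr.reg .r14 :=
      (w_kept.get .r14 rfl).trans (c_keptS.get .r14 rfl).symm
    have hrbxR : s_114964r.reg .rbx = s_11494cr.reg .rbx :=
      (w_kept.get .rbx rfl).trans (c_keptS.get .rbx rfl).symm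
    have hposS : Pos g A := hpos
    by_cases hfit : A.1.Fits ((s_114964.reg .rsi).toNat % 2 ^ 32)
    · -- the request fits: the ghost grows by the temp block P3 on top of P2, P1
      obtain ⟨r1, r2, r3, r4', r5, ws, hall, hokW⟩ := c6d_temp_call hfrS hcurS hmemS hRS e_sp' e_rdi w_same w_post hfit w_rip
        hrspR (Vorbis.conv_code_eqOn w_code) w_inv hr14R
      have hlenK := c6d_tblock_kept hposS hcurS.sd.arena hall hokW hTlS
      apply ReachVia.done
      refine Or.inl ⟨(A.1.pushTemp ((s_114964.reg .rsi).toNat % 2 ^ 32),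
        A.1.newTempObj ((s_114964.reg .rsi).toNat % 2 ^ 32) :: A.2), lengths, A2, A3, Ai, Aw, ?_⟩
      refine c6d_build hmidS sparse1S slS cntS r1 r2 r3 r4' (A.1.extends_pushTemp _) hrbxR hlenK (Or.inr ?_)
      have h0 := c6d_temps (x := s_114964r.reg .rax) tempsS r5
      rw [ersi] at h0 ⊢
      exact h0
    · -- the request does not fit: NULL, the same ghost
      obtain ⟨r1, r2, r3, r4', r5, ws, hall, hokW⟩ := c6d_temp_fail hfrS hcurS hmemS hRS e_sp' e_rdi w_post hfit w_rip
        hrspR (Vorbis.conv_code_eqOn w_code) w_inv hr14R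
      have hlenK := c6d_tblock_kept hposS hcurS.sd.arena hall hokW hTlS
      apply ReachVia.done
      exact Or.inl ⟨A, lengths, A2, A3, Ai, Aw,
        c6d_build hmidS sparse1S slS cntS r1 r2 r3 r4' (Arena.Extends.refl _) hrbxR hlenK (Or.inl r5)⟩

end Vorbis.Spec.start_decoder_C6d

theorem Vorbis.Spec.Worked.start_decoder_C6d_ok : Vorbis.Spec.start_decoder_C6d.Statement := Vorbis.Spec.start_decoder_C6d.c6d_walk
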